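-- pv_equiv track=rewrite | github.com/c-mahn/hcu-ma-gmt-software-and-interface-technology | exercises/2021-11-22_lecture/lecture4.py | dot_replace
-- ===== SOURCE A (Python) =====
-- def dot_replace(string1):
--     """
--     This function replaces dots with spaces in a string. If the string ends
--     with a dot, it will be preserved.
--
--     Args:
--         string1 ([string]): [a string with dots]
--     """
--     result = ""
--     for i, e in enumerate(string1):
--         if(e == "."):
--             if(i == len(string1)-1):
--                 result = f"{result}{e}"
--             else:
--                 result = f"{result} "
--         else:
--             result = f"{result}{e}"
--     return(result)
-- ===== SOURCE B (Python) =====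
-- def dot_replace(string1):
--     """
--     This function replaces dots with spaces in a string. If the string ends
--     with a dot, it will be preserved.
--
--     Args:
--         string1 ([string]): [a string with dots]
--     """
--     if string1.endswith("."):
--         return string1[:-1].replace(".", " ") + "."
--     return string1.replace(".", " ")
-- ===== Notes on version B (the rewrite author's own statement) =====
-- stated objective: simpler
-- what changed: Replaces the per-character enumerate loop with an i==len-1 test inside it by one endswith test on the whole string plus a bulk str.replace (on string1[:-1] when a trailing dot must be preserved).
import Mathlib
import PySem

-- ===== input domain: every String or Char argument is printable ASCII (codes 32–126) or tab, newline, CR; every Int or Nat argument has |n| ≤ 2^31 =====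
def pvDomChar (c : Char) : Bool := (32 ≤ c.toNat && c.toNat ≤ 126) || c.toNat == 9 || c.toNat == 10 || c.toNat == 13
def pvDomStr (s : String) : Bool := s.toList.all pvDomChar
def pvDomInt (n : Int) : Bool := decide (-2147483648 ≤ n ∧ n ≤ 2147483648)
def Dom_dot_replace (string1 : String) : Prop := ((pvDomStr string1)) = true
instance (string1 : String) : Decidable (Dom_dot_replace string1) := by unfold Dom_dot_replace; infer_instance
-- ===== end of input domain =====

-- B replaces A's per-character loop (with its i == len-1 test) by one endswith test
-- plus bulk replaces; equal return value on all inputs, objective: simpler.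

-- ===== PORT A =====
-- A: result accumulator, loop over enumerate(string1); a dot is kept only at index len-1.
def dot_replace (string1 : String) : String :=
  String.mk ((PySem.List.enumerate string1.toList 0).foldl
    (fun (result : List Char) (p : Int × Char) =>
      if p.2 = '.' then
        if p.1 = (string1.toList.length : Int) - 1 then result ++ [p.2]
        else result ++ [' ']
      else result ++ [p.2]) [])

-- ===== PORT B =====
-- B: if string1.endswith("."): string1[:-1].replace(".", " ") + "." else string1.replace(".", " ")
def dot_replace_alt (string1 : String) : String :=
  if PySem.Str.endswith string1 "." then
    String.mk (PySem.Chars.replace (PySem.Chars.slice string1.toList none (some (-1))) ['.'] [' '] ++ ['.'])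
  else
    String.mk (PySem.Chars.replace string1.toList ['.'] [' '])

-- ===== PRECONDITION & SPEC =====
def Spec_dot_replace (string1 : String) (out : String) : Prop := out = dot_replace_alt string1
instance (string1 : String) (out : String) : Decidable (Spec_dot_replace string1 out) := by unfold Spec_dot_replace; infer_instance

-- ===== CLAIM (what is proved, stated in full; the proofs are below) =====
def Claim_equal_dot_replace : Prop := ∀ (string1 : String), Dom_dot_replace string1 → Spec_dot_replace string1 (dot_replace string1)

-- ===== LEMMAS AND PROOFS =====

-- ===== VERDICT (by name: the statement is the Claim_ definition above) =====
-- the character map both sides compute away from a preserved trailing dot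
def dotf (c : Char) : Char := if c = '.' then ' ' else c

theorem go_single (fuel : Nat) : ∀ (l acc : List Char), l.length ≤ fuel →
    PySem.Chars.replace.go ['.'] [' '] fuel l acc = acc.reverse ++ l.map dotf := by
  induction fuel with
  | zero =>
    intro l acc h
    cases l with
    | nil => simp [PySem.Chars.replace.go]
    | cons c t => simp at h
  | succ n ih =>
    intro l acc h
    cases l with
    | nil => simp [PySem.Chars.replace.go]
    | cons c t =>
      by_cases hc : c = '.'
      · subst hc
        simp [PySem.Chars.replace.go, List.isPrefixOf, ih t _ (by simpa using h), dotf]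
      · simp only [PySem.Chars.replace.go, List.isPrefixOf, List.map_cons]
        rw [if_neg (by simp [Ne.symm hc])]
        simp [ih t _ (by simpa using h), dotf, hc]

theorem replace_single (l : List Char) :
    PySem.Chars.replace l ['.'] [' '] = l.map dotf := by
  simpa [PySem.Chars.replace] using go_single l.length l [] le_rfl

theorem foldl_map_part (N : Int) (l : List (Int × Char)) (r : List Char)
    (h : ∀ p ∈ l, p.1 ≠ N - 1) :
    l.foldl (fun (result : List Char) (p : Int × Char) =>
      if p.2 = '.' then
        if p.1 = N - 1 then result ++ [p.2] else result ++ [' ']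
      else result ++ [p.2]) r = r ++ (l.map (·.2)).map dotf := by
  induction l generalizing r with
  | nil => simp
  | cons p t ih =>
    have hp : p.1 ≠ N - 1 := h p (by simp)
    by_cases hc : p.2 = '.'
    · simp [hc, hp, ih _ (fun q hq => h q (by simp [hq])), dotf]
    · simp [hc, ih _ (fun q hq => h q (by simp [hq])), dotf]

theorem main_list (cs : List Char) :
    (PySem.List.enumerate cs 0).foldl
      (fun (result : List Char) (p : Int × Char) =>
        if p.2 = '.' then
          if p.1 = (cs.length : Int) - 1 then result ++ [p.2] else result ++ [' ']
        else result ++ [p.2]) [] =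
    if PySem.Chars.endswith cs ['.'] then
      PySem.Chars.replace (PySem.List.slice cs none (some (-1))) ['.'] [' '] ++ ['.']
    else
      PySem.Chars.replace cs ['.'] [' '] := by
  induction cs using List.reverseRecOn with
  | nil =>
    have hend : PySem.Chars.endswith ([] : List Char) ['.'] = false := by decide
    simp [PySem.List.enumerate_nil, hend, replace_single]
  | append_singleton ys c _ =>
    have hpart : ∀ p ∈ PySem.List.enumerate ys 0, p.1 ≠ ((ys ++ [c]).length : Int) - 1 := by
      intro p hp
      rcases (PySem.List.mem_enumerate_iff ys 0 p).1 hp with ⟨k, hk, rfl⟩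
      simp only [List.length_append, List.length_cons, List.length_nil]
      omega
    rw [PySem.List.enumerate_append, List.foldl_append, foldl_map_part _ _ _ hpart]
    have hlast : PySem.List.enumerate [c] (0 + (ys.length : Int)) =
        [(((ys.length : Int)), c)] := by
      simp [PySem.List.enumerate_cons, PySem.List.enumerate_nil]
    rw [hlast]
    simp only [PySem.List.map_snd_enumerate, List.foldl_cons, List.foldl_nil,
      PySem.List.slice_to_neg_one, List.dropLast_concat]
    by_cases hc : c = '.'
    · subst hc
      have hend : PySem.Chars.endswith (ys ++ ['.']) ['.'] = true :=
        (PySem.Chars.endswith_iff _ _).2 ⟨ys, rfl⟩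
      simp [hend, replace_single]
    · have hend : PySem.Chars.endswith (ys ++ [c]) ['.'] = false := by
        rw [Bool.eq_false_iff]
        intro h
        have := ((PySem.Chars.endswith_iff _ _).1 h).getLast (by simp)
        simp at this
        exact hc this.symm
      simp [hend, hc, replace_single, dotf]

theorem dot_replace_spec : Claim_equal_dot_replace := by
  intro s _
  unfold Spec_dot_replace dot_replace dot_replace_alt
  simp only [PySem.Str.endswith_eq, PySem.Chars.slice_eq_listSlice]
  rw [main_list s.toList]
  by_cases hend : PySem.Chars.endswith s.toList ".".toList = true
  · simp [show (".".toList : List Char) = ['.'] from rfl] at *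
    simp [hend]
  · simp only [Bool.not_eq_true] at hend
    simp [show (".".toList : List Char) = ['.'] from rfl] at *
    simp [hend]
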